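-- pv_equiv track=rewrite | github.com/Josue23/lista-de-exercicios-python-brasil | secao_03_estrutura_de_repeticao/ex_11_gerar_numeros_de_intervalo_e_somar.py | calcular_numeros_no_intervalo_e_somar
-- ===== SOURCE A (Python) =====
-- def calcular_numeros_no_intervalo_e_somar(inicio: int, fim: int) -> str:
--     """Escreva aqui em baixo a sua solução"""
--
--     soma = 0
--     sequencia = ''
--     if inicio > fim:
--         mensagem = f'Sequência: vazia. Soma: {soma}'
--     else:
--         '''
--         PEP 572 – Assignment Expressions
--         https://stackoverflow.com/a/55890694/5487213
--         https://peps.python.org/pep-0572/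
--         '''
--         [soma := soma + x for x in range(inicio, fim)]
--         [sequencia := sequencia +
--             f'{numero}, ' for numero in range(inicio, fim)]
--         sequencia = sequencia.removesuffix(', ')
--
--         mensagem = f'Sequência: {sequencia}. Soma: {soma}'
--
--     return mensagem
-- ===== SOURCE B (Python) =====
-- def calcular_numeros_no_intervalo_e_somar(inicio: int, fim: int) -> str:
--     if inicio > fim:
--         return 'Sequência: vazia. Soma: 0'
--     soma = (inicio + fim - 1) * (fim - inicio) // 2
--     sequencia = ', '.join(str(n) for n in range(inicio, fim))
--     return f'Sequência: {sequencia}. Soma: {soma}'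
-- ===== Notes on version B (the rewrite author's own statement) =====
-- stated objective: simpler
-- what changed: Replaces A's two separate walrus-assignment list comprehensions (one summing the range, one concatenating '{n}, ' pieces then removesuffix) with a closed-form arithmetic-series sum and a single ', '.join over the range.
import Mathlib
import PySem

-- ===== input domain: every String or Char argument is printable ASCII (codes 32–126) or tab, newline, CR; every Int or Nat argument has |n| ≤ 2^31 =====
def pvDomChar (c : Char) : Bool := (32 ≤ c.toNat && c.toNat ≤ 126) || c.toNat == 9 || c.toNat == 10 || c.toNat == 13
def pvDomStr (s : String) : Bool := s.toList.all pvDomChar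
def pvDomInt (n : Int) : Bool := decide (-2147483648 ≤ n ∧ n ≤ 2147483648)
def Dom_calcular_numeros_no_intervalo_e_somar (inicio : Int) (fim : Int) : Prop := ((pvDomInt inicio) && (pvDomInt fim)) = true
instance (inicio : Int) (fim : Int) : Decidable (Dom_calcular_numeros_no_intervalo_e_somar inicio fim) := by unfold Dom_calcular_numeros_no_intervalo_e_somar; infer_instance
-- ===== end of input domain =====

-- B replaces A's two walrus-comprehension passes by a closed-form sum and a single ', '.join (objective: simpler).

-- ===== PORT A =====
-- hand port of Python's str.removesuffix (exact: drops suf from the end iff it is a suffix)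
def pvRemoveSuffix (cs suf : List Char) : List Char :=
  if suf.isSuffixOf cs then cs.take (cs.length - suf.length) else cs

def calcular_numeros_no_intervalo_e_somar (inicio : Int) (fim : Int) : String :=
  let soma : Int := 0
  let sequencia : List Char := []
  if inicio > fim then
    String.ofList ("Sequência: vazia. Soma: ".toList ++ PySem.Int.toChars soma)
  else
    let soma := (PySem.List.pyRange inicio fim 1).foldl (fun s x => s + x) soma
    let sequencia := (PySem.List.pyRange inicio fim 1).foldl
      (fun acc numero => acc ++ (PySem.Int.toChars numero ++ [',', ' '])) sequencia
    let sequencia := pvRemoveSuffix sequencia [',', ' ']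
    String.ofList ("Sequência: ".toList ++ sequencia ++ ". Soma: ".toList ++ PySem.Int.toChars soma)

-- ===== PORT B =====
def calcular_numeros_no_intervalo_e_somar_alt (inicio : Int) (fim : Int) : String :=
  if inicio > fim then
    "Sequência: vazia. Soma: 0"
  else
    let soma := PySem.Int.floordiv ((inicio + fim - 1) * (fim - inicio)) 2
    let sequencia := PySem.Chars.join [',', ' ']
      ((PySem.List.pyRange inicio fim 1).map PySem.Int.toChars)
    String.ofList ("Sequência: ".toList ++ sequencia ++ ". Soma: ".toList ++ PySem.Int.toChars soma)

-- ===== PRECONDITION & SPEC =====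
def Spec_calcular_numeros_no_intervalo_e_somar (inicio : Int) (fim : Int) (out : String) : Prop := out = calcular_numeros_no_intervalo_e_somar_alt inicio fim
instance (inicio : Int) (fim : Int) (out : String) : Decidable (Spec_calcular_numeros_no_intervalo_e_somar inicio fim out) := by unfold Spec_calcular_numeros_no_intervalo_e_somar; infer_instance

-- ===== CLAIM (what is proved, stated in full; the proofs are below) =====
def Claim_equal_calcular_numeros_no_intervalo_e_somar : Prop := ∀ (inicio : Int) (fim : Int), Dom_calcular_numeros_no_intervalo_e_somar inicio fim → Spec_calcular_numeros_no_intervalo_e_somar inicio fim (calcular_numeros_no_intervalo_e_somar inicio fim)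

-- ===== LEMMAS AND PROOFS =====

-- sum of range(a, a+n) has the closed form used by B
theorem pv_sum_range (n : ℕ) (a : Int) :
    2 * (PySem.List.pyRange a (a + n) 1).foldl (fun s x => s + x) 0
      = (a + (a + n) - 1) * n := by
  induction n with
  | zero => simp [PySem.List.pyRange_one_eq_nil]
  | succ m ih =>
    have h : PySem.List.pyRange a (a + (m + 1 : ℕ)) 1
        = PySem.List.pyRange a (a + m) 1 ++ [a + m] := by
      have : (a + ((m : Int) + 1)) = (a + m) + 1 := by ring
      push_cast
      rw [this, PySem.List.pyRange_one_succ_right (by omega)]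
    rw [h, List.foldl_append]
    push_cast
    push_cast at ih
    simp only [List.foldl_cons, List.foldl_nil]
    linear_combination ih

theorem pv_floordiv_two_mul (s : Int) : PySem.Int.floordiv (2 * s) 2 = s := by
  simp [PySem.Int.floordiv]

theorem pv_sum_closed (a b : Int) (hab : a ≤ b) :
    (PySem.List.pyRange a b 1).foldl (fun s x => s + x) 0
      = PySem.Int.floordiv ((a + b - 1) * (b - a)) 2 := by
  obtain ⟨n, hn⟩ : ∃ n : ℕ, b = a + n := ⟨(b - a).toNat, by omega⟩
  subst hn
  have := pv_sum_range n a
  have h2 : (a + (a + n) - 1) * ((a + n) - a) = 2 * ((PySem.List.pyRange a (a + n) 1).foldl (fun s x => s + x) 0) := by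
    rw [this]; ring
  rw [h2, pv_floordiv_two_mul]

-- flatMap with a trailing separator is join ++ separator, for a nonempty list
theorem pv_flatMap_join (sep : List Char) (g : Int → List Char) (l : List Int) (hl : l ≠ []) :
    l.flatMap (fun x => g x ++ sep) = PySem.Chars.join sep (l.map g) ++ sep := by
  induction l with
  | nil => exact absurd rfl hl
  | cons x t ih =>
    cases t with
    | nil => simp [PySem.Chars.join_singleton]
    | cons y u =>
      have hih := ih (by simp)
      simp only [List.flatMap_cons, List.map_cons, PySem.Chars.join_cons_cons,
        List.append_assoc] at hih ⊢
      rw [hih]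

theorem pv_removeSuffix_append (J sep : List Char) :
    pvRemoveSuffix (J ++ sep) sep = J := by
  unfold pvRemoveSuffix
  rw [if_pos]
  · simp
  · exact List.isSuffixOf_iff_suffix.mpr ⟨J, rfl⟩

-- the string A builds equals the string B builds
theorem pv_seq_eq (a b : Int) :
    pvRemoveSuffix
      ((PySem.List.pyRange a b 1).foldl
        (fun acc numero => acc ++ (PySem.Int.toChars numero ++ [',', ' '])) []) [',', ' ']
    = PySem.Chars.join [',', ' '] ((PySem.List.pyRange a b 1).map PySem.Int.toChars) := by
  rw [PySem.List.foldl_append_eq_flatMap]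
  by_cases hnil : PySem.List.pyRange a b 1 = []
  · simp [hnil, pvRemoveSuffix, PySem.Chars.join_nil]
  · rw [List.nil_append, pv_flatMap_join _ _ _ hnil, pv_removeSuffix_append _ _]

-- ===== VERDICT (by name: the statement is the Claim_ definition above) =====
theorem calcular_numeros_no_intervalo_e_somar_spec : Claim_equal_calcular_numeros_no_intervalo_e_somar := by
  intro inicio fim _
  unfold Spec_calcular_numeros_no_intervalo_e_somar
  unfold calcular_numeros_no_intervalo_e_somar calcular_numeros_no_intervalo_e_somar_alt
  by_cases h : inicio > fim
  · simp only [if_pos h]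
    decide
  · simp only [if_neg h]
    rw [pv_sum_closed inicio fim (by omega), pv_seq_eq inicio fim]
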